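-- pv_equiv track=rewrite | github.com/isakgb/advent-of-code-2023 | days/12_2.py | get_contigious
-- ===== SOURCE A (Python) =====
-- def get_contigious(layout):
--     contigious = []
--
--     prev = 0
--     for i, c in enumerate(layout):
--         if c == '#':
--             prev += 1
--         else:
--             if prev > 0:
--                 contigious.append(prev)
--             prev = 0
--     if prev > 0:
--         contigious.append(prev)
--     return contigious
-- ===== SOURCE B (Python) =====
-- from itertools import groupby
--
-- def get_contigious(layout):
--     return [sum(1 for _ in g) for k, g in groupby(layout) if k == '#']
-- ===== Notes on version B (the rewrite author's own statement) =====
-- stated objective: idiomatic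
-- what changed: Replaces the stateful prev-counter loop with its end-of-input flush by an itertools.groupby pipeline: group into maximal runs, keep the '#' runs, emit their lengths.
import Mathlib
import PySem

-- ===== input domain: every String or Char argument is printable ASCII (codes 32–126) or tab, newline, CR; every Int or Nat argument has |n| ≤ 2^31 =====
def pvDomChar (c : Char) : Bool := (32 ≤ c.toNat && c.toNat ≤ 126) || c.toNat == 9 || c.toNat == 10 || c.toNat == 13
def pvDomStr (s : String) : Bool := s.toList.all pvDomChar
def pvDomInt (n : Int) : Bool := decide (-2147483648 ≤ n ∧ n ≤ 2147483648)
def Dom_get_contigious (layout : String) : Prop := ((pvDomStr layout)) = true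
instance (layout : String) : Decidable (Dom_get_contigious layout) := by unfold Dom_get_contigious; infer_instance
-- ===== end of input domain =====

-- B replaces A's stateful prev-counter loop (with its end-of-input flush) by a
-- groupby pipeline: group into maximal runs, keep '#' runs, emit their lengths.

-- ===== PORT A =====
-- for i, c in enumerate(layout): stateful loop over (contigious, prev), then final flush
def get_contigious (layout : String) : List Int :=
  let st := (PySem.List.enumerate layout.toList).foldl
    (fun (st : List Int × Int) ic =>
      if ic.2 = '#' then (st.1, st.2 + 1)
      else (if st.2 > 0 then st.1 ++ [st.2] else st.1, 0))
    ([], 0)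
  if st.2 > 0 then st.1 ++ [st.2] else st.1

-- ===== PORT B =====
-- hand port of itertools.groupby over a list of chars: maximal runs of equal
-- consecutive elements as (key, run length) pairs; exact for finite lists
def pyGroupLen : List Char → List (Char × Nat)
  | [] => []
  | c :: rest =>
    match pyGroupLen rest with
    | [] => [(c, 1)]
    | (k, n) :: gs => if c = k then (c, n + 1) :: gs else (c, 1) :: (k, n) :: gs

def get_contigious_alt (layout : String) : List Int :=
  ((pyGroupLen layout.toList).filter (fun p => p.1 == '#')).map (fun p => (p.2 : Int))

-- ===== PRECONDITION & SPEC =====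
def Spec_get_contigious (layout : String) (out : List Int) : Prop := out = get_contigious_alt layout
instance (layout : String) (out : List Int) : Decidable (Spec_get_contigious layout out) := by unfold Spec_get_contigious; infer_instance

-- ===== CLAIM (what is proved, stated in full; the proofs are below) =====
def Claim_equal_get_contigious : Prop := ∀ (layout : String), Dom_get_contigious layout → Spec_get_contigious layout (get_contigious layout)

-- ===== LEMMAS AND PROOFS =====

-- A's recursion, written structurally: the loop body plus final flush
def runA (prev : Int) : List Char → List Int
  | [] => if prev > 0 then [prev] else []
  | c :: rest =>
    if c = '#' then runA (prev + 1) rest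
    else if prev > 0 then prev :: runA 0 rest else runA 0 rest

-- B's result on a char list
def runB (l : List Char) : List Int :=
  ((pyGroupLen l).filter (fun p => p.1 == '#')).map (fun p => (p.2 : Int))

theorem pyGroupLen_headKey : ∀ l : List Char, (pyGroupLen l).head?.map Prod.fst = l.head? := by
  intro l
  cases l with
  | nil => rfl
  | cons c rest =>
    simp only [pyGroupLen]
    cases h : pyGroupLen rest with
    | nil => rfl
    | cons p gs =>
      obtain ⟨k, n⟩ := p
      by_cases hk : c = k <;> simp [hk]

theorem pyGroupLen_nil_iff : ∀ l : List Char, pyGroupLen l = [] ↔ l = [] := by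
  intro l
  cases l with
  | nil => simp [pyGroupLen]
  | cons c rest =>
    simp only [pyGroupLen]
    constructor
    · intro h
      cases hg : pyGroupLen rest with
      | nil => rw [hg] at h; exact absurd h (by simp)
      | cons p gs =>
        obtain ⟨k, n⟩ := p
        rw [hg] at h
        by_cases hk : c = k <;> simp [hk] at h
    · intro h; exact absurd h (by simp)

-- merge a pending prefix count into B's result, according to whether l starts with '#'
def mergePrev (prev : Int) (l : List Char) (out : List Int) : List Int :=
  if l.head? = some '#' then
    match out with
    | [] => [prev]
    | x :: xs => (x + prev) :: xs
  else if prev > 0 then prev :: out else out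

theorem runA_eq_merge : ∀ (l : List Char) (prev : Int), 0 ≤ prev →
    runA prev l = mergePrev prev l (runB l) := by
  intro l
  induction l with
  | nil => intro prev _; simp [runA, runB, pyGroupLen, mergePrev]
  | cons c rest ih =>
    intro prev hp
    by_cases hc : c = '#'
    · subst hc
      have h1 : runA prev ('#' :: rest) = runA (prev + 1) rest := by simp [runA]
      rw [h1, ih (prev + 1) (by omega)]
      cases hg : pyGroupLen rest with
      | nil =>
        have hrest : rest = [] := (pyGroupLen_nil_iff rest).mp hg
        subst hrest
        have hpos : prev + 1 > 0 := by omega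
        simp [mergePrev, runB, pyGroupLen, hpos]
        omega
      | cons p gs =>
        obtain ⟨k, n⟩ := p
        have hhead : rest.head? = some k := by
          have := pyGroupLen_headKey rest
          rw [hg] at this; simpa using this.symm
        by_cases hk : k = '#'
        · subst hk
          simp [mergePrev, hhead, runB, pyGroupLen, hg]
          omega
        · have hh2 : ¬ (rest.head? = some '#') := by
            rw [hhead]; simp; exact hk
          simp only [mergePrev, hh2, runB, pyGroupLen, hg]
          have hk' : ('#' : Char) ≠ k := fun h => hk h.symm
          simp [hk', hk, hp]
          omega
    · have h1 : runA prev (c :: rest) =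
          if prev > 0 then prev :: runA 0 rest else runA 0 rest := by
        simp [runA, hc]
      have hB0 : runA 0 rest = runB rest := by
        rw [ih 0 le_rfl]
        cases hg : pyGroupLen rest with
        | nil =>
          have hrest : rest = [] := (pyGroupLen_nil_iff rest).mp hg
          subst hrest; simp [mergePrev, runB, pyGroupLen]
        | cons p gs =>
          obtain ⟨k, n⟩ := p
          have hhead : rest.head? = some k := by
            have := pyGroupLen_headKey rest
            rw [hg] at this; simpa using this.symm
          by_cases hk : k = '#'
          · subst hk
            simp [mergePrev, hhead, runB, hg]
          · have hh2 : ¬ (rest.head? = some '#') := by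
              rw [hhead]; simp; exact hk
            simp [mergePrev, hh2]
      have hBl : runB (c :: rest) = runB rest := by
        simp only [runB, pyGroupLen]
        cases hg : pyGroupLen rest with
        | nil =>
          have hrest : rest = [] := (pyGroupLen_nil_iff rest).mp hg
          subst hrest
          simp [hc]
        | cons p gs =>
          obtain ⟨k, n⟩ := p
          by_cases hk : c = k
          · subst hk; simp [hc]
          · simp [hk, hc]
      have hh : ¬ ((c :: rest).head? = some '#') := by simp [hc]
      rw [h1, hBl, mergePrev.eq_def, if_neg hh, hB0]

theorem runA_eq_runB (l : List Char) : runA 0 l = runB l := by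
  rw [runA_eq_merge l 0 le_rfl]
  rw [mergePrev.eq_def]
  split
  · rename_i hh
    cases l with
    | nil => simp at hh
    | cons c rest =>
      have hc : c = '#' := by simpa using hh
      subst hc
      simp only [runB, pyGroupLen]
      cases hg : pyGroupLen rest with
      | nil => simp
      | cons p gs =>
        obtain ⟨k, n⟩ := p
        by_cases hk : ('#' : Char) = k
        · subst hk
          simp
        · have hk2 : ¬ k = '#' := fun h => hk h.symm
          simp [hk, hk2]
  · simp

-- the enumerate-fold ignores indices: reduce to the structural loop
theorem foldl_enum_runA : ∀ (l : List Char) (s : Int) (acc : List Int) (prev : Int),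
    (let st := (PySem.List.enumerate l s).foldl
        (fun (st : List Int × Int) ic =>
          if ic.2 = '#' then (st.1, st.2 + 1)
          else (if st.2 > 0 then st.1 ++ [st.2] else st.1, 0))
        (acc, prev)
     if st.2 > 0 then st.1 ++ [st.2] else st.1) = acc ++ runA prev l := by
  intro l
  induction l with
  | nil =>
    intro s acc prev
    simp only [PySem.List.enumerate_nil, List.foldl_nil, runA]
    split <;> simp
  | cons c rest ih =>
    intro s acc prev
    rw [PySem.List.enumerate_cons, List.foldl_cons]
    by_cases hc : c = '#'
    · simpa [hc, runA] using ih (s + 1) acc (prev + 1)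
    · by_cases hp : prev > 0
      · simp only [runA, hc, if_false, hp, if_pos]
        simpa [hc, hp] using ih (s + 1) (acc ++ [prev]) 0
      · simp only [runA, hc, if_false, hp]
        simpa [hc, hp] using ih (s + 1) acc 0

-- ===== VERDICT (by name: the statement is the Claim_ definition above) =====
theorem get_contigious_spec : Claim_equal_get_contigious := by
  intro layout _
  show get_contigious layout = get_contigious_alt layout
  have h := foldl_enum_runA layout.toList 0 [] 0
  simp only [get_contigious]
  rw [h, List.nil_append, runA_eq_runB]
  rfl
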